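-- pv_equiv track=rewrite | github.com/lurak/LA_project-Game-Theory | saddle_point.py | find_min_max_column
-- ===== SOURCE A (Python) =====
-- def find_min_max_column(matrix):
--     f_arr = list()
--     arr = list()
--     for j in range(len(matrix[0])):
--         for i in range(len(matrix)):
--             arr.append(matrix[i][j])
--         f_arr.append(max(arr))
--         arr = list()
--     return min(f_arr)
-- ===== SOURCE B (Python) =====
-- def find_min_max_column(matrix):
--     maxes = list(matrix[0])
--     for row in matrix[1:]:
--         maxes = [max(a, b) for a, b in zip(maxes, row)]
--     return min(maxes)
-- ===== Notes on version B (the rewrite author's own statement) =====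
-- stated objective: alternative
-- what changed: Replaces A's column-major nested scans (rebuild each column list, take its max) by a single row-major pass that maintains a running per-column-maximum vector and takes its min at the end.
import Mathlib
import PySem

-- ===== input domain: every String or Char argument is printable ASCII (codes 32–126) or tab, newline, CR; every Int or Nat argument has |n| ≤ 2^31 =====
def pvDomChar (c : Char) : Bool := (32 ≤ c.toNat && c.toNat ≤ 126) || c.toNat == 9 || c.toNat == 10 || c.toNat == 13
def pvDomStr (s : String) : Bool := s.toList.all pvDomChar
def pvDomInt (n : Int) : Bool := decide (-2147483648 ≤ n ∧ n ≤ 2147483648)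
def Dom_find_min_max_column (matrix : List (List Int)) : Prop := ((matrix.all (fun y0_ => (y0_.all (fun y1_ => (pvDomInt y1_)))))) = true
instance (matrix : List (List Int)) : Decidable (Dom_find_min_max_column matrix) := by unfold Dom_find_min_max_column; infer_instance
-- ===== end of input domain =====

-- B replaces A's per-column scans by a single row-major pass keeping a running per-column-maximum
-- vector (objective: alternative decomposition, similar cost).

-- ===== PORT A =====
-- per column j: collect the column, append its max; finally min over the column maxima
def find_min_max_column (matrix : List (List Int)) : Int :=
  let f_arr : List Int :=
    (PySem.List.pyRange 0 ((PySem.List.pyGetD matrix 0 []).length : Int) 1).foldl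
      (fun f_arr j =>
        let arr : List Int :=
          (PySem.List.pyRange 0 (matrix.length : Int) 1).foldl
            (fun arr i => arr ++ [PySem.List.pyGetD (PySem.List.pyGetD matrix i []) j 0]) []
        f_arr ++ [(PySem.List.max? arr (fun y => y)).getD 0]) []
  (PySem.List.min? f_arr (fun y => y)).getD 0

-- ===== PORT B =====
-- maxes = list(matrix[0]); for row in matrix[1:]: maxes = [max(a,b) for a,b in zip(maxes,row)]; min(maxes)
def find_min_max_column_alt (matrix : List (List Int)) : Int :=
  let maxes0 : List Int := PySem.List.pyGetD matrix 0 []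
  let maxes : List Int :=
    (PySem.List.slice matrix (some 1) none).foldl
      (fun maxes row => (maxes.zip row).map (fun p => max p.1 p.2)) maxes0
  (PySem.List.min? maxes (fun y => y)).getD 0

-- ===== PRECONDITION & SPEC =====
-- Pre_ excludes inputs where Python A raises: the empty matrix (IndexError on matrix[0]),
-- an empty first row (ValueError from min([])), and rows shorter than the first row
-- (IndexError on matrix[i][j]).
def Pre_find_min_max_column (matrix : List (List Int)) : Prop :=
  matrix ≠ [] ∧ matrix.headD [] ≠ [] ∧
    ∀ row ∈ matrix, (matrix.headD []).length ≤ row.length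
instance (matrix : List (List Int)) : Decidable (Pre_find_min_max_column matrix) := by
  unfold Pre_find_min_max_column; infer_instance

def pvWitness_find_min_max_column : List (List Int) := [[1, 2], [3, 4]]

def Spec_find_min_max_column (matrix : List (List Int)) (out : Int) : Prop := out = find_min_max_column_alt matrix
instance (matrix : List (List Int)) (out : Int) : Decidable (Spec_find_min_max_column matrix out) := by unfold Spec_find_min_max_column; infer_instance

-- ===== CLAIM (what is proved, stated in full; the proofs are below) =====
def Claim_equal_find_min_max_column : Prop := ∀ (matrix : List (List Int)), Dom_find_min_max_column matrix → Pre_find_min_max_column matrix → Spec_find_min_max_column matrix (find_min_max_column matrix)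

-- ===== LEMMAS AND PROOFS =====

-- A's column list for index j equals the j-th entry (default 0) of every row
theorem colA_eq (matrix : List (List Int)) (j : Int) :
    (PySem.List.pyRange 0 (matrix.length : Int) 1).foldl
      (fun arr i => arr ++ [PySem.List.pyGetD (PySem.List.pyGetD matrix i []) j 0]) []
    = matrix.map (fun row => PySem.List.pyGetD row j 0) := by
  rw [PySem.List.foldl_append_singleton_eq_map, List.nil_append]
  calc (PySem.List.pyRange 0 (matrix.length : Int) 1).map
          (fun i => PySem.List.pyGetD (PySem.List.pyGetD matrix i []) j 0)
      = ((PySem.List.pyRange 0 (matrix.length : Int) 1).map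
          (fun i => PySem.List.pyGetD matrix i [])).map (fun row => PySem.List.pyGetD row j 0) := by
        rw [List.map_map]; rfl
    _ = matrix.map (fun row => PySem.List.pyGetD row j 0) := by
        rw [PySem.List.map_pyGetD_pyRange_zero']

-- B's per-row combine, pointwise (k below the running vector's length)
theorem zipmax_getD (m row : List Int) (k : Nat) (hk : k < m.length) (hr : m.length ≤ row.length) :
    ((m.zip row).map (fun p : Int × Int => max p.1 p.2)).getD k 0
      = max (m.getD k 0) (row.getD k 0) := by
  have hz : k < (m.zip row).length := by simp [List.length_zip]; omega
  have hrr : k < row.length := lt_of_lt_of_le hk hr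
  rw [List.getD_eq_getElem _ _ (by simpa using hz), List.getD_eq_getElem _ _ hk,
    List.getD_eq_getElem _ _ hrr]
  simp [List.getElem_zip]

-- invariant of B's row loop: the running vector is the per-column running maximum
theorem foldl_zipmax (rest : List (List Int)) :
    ∀ (m : List Int), (∀ row ∈ rest, m.length ≤ row.length) →
    rest.foldl (fun maxes row => (maxes.zip row).map (fun p : Int × Int => max p.1 p.2)) m
      = (List.range m.length).map
          (fun k => rest.foldl (fun a row => max a (row.getD k 0)) (m.getD k 0)) := by
  induction rest with
  | nil =>
    intro m _
    simp only [List.foldl_nil]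
    apply List.ext_getElem
    · simp
    · intro i h1 h2; simp [List.getD_eq_getElem?_getD, List.getElem?_eq_getElem h1]
  | cons row rest ih =>
    intro m hlen
    have hml : m.length ≤ row.length := hlen row (List.mem_cons_self ..)
    have hlen' : ((m.zip row).map (fun p : Int × Int => max p.1 p.2)).length = m.length := by
      simp [List.length_zip]; omega
    simp only [List.foldl_cons]
    rw [ih _ (fun r hr => by rw [hlen']; exact hlen r (List.mem_cons_of_mem _ hr)), hlen']
    refine List.map_congr_left ?_
    intro k hk
    rw [List.mem_range] at hk
    rw [zipmax_getD m row k hk hml]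

-- the common characterisation: both ports compute
-- min over k < |r0| of foldl max over the remaining rows' k-th entries
theorem portA_char (r0 : List Int) (rest : List (List Int)) :
    find_min_max_column (r0 :: rest)
      = (PySem.List.min? ((List.range r0.length).map
          (fun k => rest.foldl (fun a row => max a (row.getD k 0)) (r0.getD k 0)))
          (fun y => y)).getD 0 := by
  unfold find_min_max_column
  simp only [PySem.List.pyGetD_zero_cons]
  rw [PySem.List.foldl_append_singleton_eq_map, List.nil_append]
  congr 2
  simp only [colA_eq, List.map_cons, PySem.List.max?_id_cons, Option.getD_some, List.foldl_map]
  rw [PySem.List.pyRange_one, List.map_map]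
  simp only [Int.sub_zero, Int.toNat_natCast]
  refine List.map_congr_left ?_
  intro k _
  simp only [Function.comp_apply, zero_add, PySem.List.pyGetD_natCast]

theorem portB_char (r0 : List Int) (rest : List (List Int))
    (h : ∀ row ∈ rest, r0.length ≤ row.length) :
    find_min_max_column_alt (r0 :: rest)
      = (PySem.List.min? ((List.range r0.length).map
          (fun k => rest.foldl (fun a row => max a (row.getD k 0)) (r0.getD k 0)))
          (fun y => y)).getD 0 := by
  unfold find_min_max_column_alt
  simp only [PySem.List.pyGetD_zero_cons, PySem.List.slice_from_one, List.tail_cons]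
  rw [foldl_zipmax rest r0 h]

-- ===== VERDICT (by name: the statement is the Claim_ definition above) =====
theorem find_min_max_column_spec : Claim_equal_find_min_max_column := by
  intro matrix _ hpre
  obtain ⟨hne, _, hlen⟩ := hpre
  cases matrix with
  | nil => exact absurd rfl hne
  | cons r0 rest =>
    simp only [List.headD_cons] at hlen
    unfold Spec_find_min_max_column
    rw [portA_char, portB_char r0 rest
      (fun row hr => hlen row (List.mem_cons_of_mem _ hr))]
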